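-- pv_equiv track=rewrite | github.com/sathwikkes/got-fandom-chatbot | llm_integration.py | _contains_uncertainty_markers
-- ===== SOURCE A (Python) =====
-- from typing import Dict, Any, Optional, List, Set, Tuple
--
-- def _contains_uncertainty_markers(response: str, entities: Set[str]) -> bool:
--     """Check if the response already expresses uncertainty about the potential hallucinations"""
--     # List of phrases indicating uncertainty
--     uncertainty_phrases = [
--         "i don't have information",
--         "not mentioned in",
--         "isn't specified",
--         "not specified",
--         "isn't mentioned",
--         "not provided",
--         "no information",
--         "don't know",
--         "isn't clear",
--         "not clear",
--         "based on the information i have",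
--         "the provided context doesn't",
--         "not detailed in",
--         "can't determine",
--         "cannot determine"
--     ]
--
--     # Check if any uncertainty phrase is present for each entity
--     response_lower = response.lower()
--     for entity in entities:
--         entity_lower = entity.lower()
--         for phrase in uncertainty_phrases:
--             if f"{phrase}" in response_lower and entity_lower in response_lower:
--                 return True
--
--     return False
-- ===== SOURCE B (Python) =====
-- def _contains_uncertainty_markers(response: str, entities) -> bool:
--     """Check if the response already expresses uncertainty about the potential hallucinations"""
--     uncertainty_phrases = [
--         "i don't have information",
--         "not mentioned in",
--         "isn't specified",
--         "not specified",
--         "isn't mentioned",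
--         "not provided",
--         "no information",
--         "don't know",
--         "isn't clear",
--         "not clear",
--         "based on the information i have",
--         "the provided context doesn't",
--         "not detailed in",
--         "can't determine",
--         "cannot determine"
--     ]
--     response_lower = response.lower()
--     has_phrase = any(p in response_lower for p in uncertainty_phrases)
--     has_entity = any(e.lower() in response_lower for e in entities)
--     return has_phrase and has_entity
-- ===== Notes on version B (the rewrite author's own statement) =====
-- stated objective: simpler
-- what changed: Replaces the nested entities-by-phrases loop with two independent single-pass any() scans over the same lowercased response (phrase presence and entity presence are independent conditions), combined with a single and; this drops the E*P product to E+P substring scans.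
import Mathlib
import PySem

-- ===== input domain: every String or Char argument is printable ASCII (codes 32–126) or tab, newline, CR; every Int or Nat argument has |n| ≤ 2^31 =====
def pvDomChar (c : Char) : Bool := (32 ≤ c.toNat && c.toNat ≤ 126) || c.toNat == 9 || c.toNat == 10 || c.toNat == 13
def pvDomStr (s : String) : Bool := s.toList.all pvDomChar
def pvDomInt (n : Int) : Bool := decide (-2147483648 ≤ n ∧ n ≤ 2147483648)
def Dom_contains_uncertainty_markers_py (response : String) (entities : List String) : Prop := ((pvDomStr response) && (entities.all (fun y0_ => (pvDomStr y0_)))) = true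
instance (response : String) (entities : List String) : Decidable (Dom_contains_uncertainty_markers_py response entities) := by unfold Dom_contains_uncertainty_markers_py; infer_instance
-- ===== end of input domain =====

-- B replaces A's nested entities-by-phrases loop with two independent any-scans over the
-- lowercased response, combined with a single `and` (objective: simpler).


-- the shared literal phrase list
def pvPhrases : List String :=
  ["i don't have information",
   "not mentioned in",
   "isn't specified",
   "not specified",
   "isn't mentioned",
   "not provided",
   "no information",
   "don't know",
   "isn't clear",
   "not clear",
   "based on the information i have",
   "the provided context doesn't",
   "not detailed in",
   "can't determine",
   "cannot determine"]

-- ===== PORT A =====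
-- inner 'for phrase in uncertainty_phrases' loop with early return
def pvInnerA (response_lower entity_lower : String) : List String → Bool
  | [] => false
  | p :: ps =>
    if PySem.Str.isIn p response_lower && PySem.Str.isIn entity_lower response_lower then true
    else pvInnerA response_lower entity_lower ps

-- outer 'for entity in entities' loop with early return
def pvOuterA (response_lower : String) : List String → Bool
  | [] => false
  | e :: es =>
    if pvInnerA response_lower (PySem.Str.lower e) pvPhrases then true
    else pvOuterA response_lower es

def contains_uncertainty_markers_py (response : String) (entities : List String) : Bool :=
  pvOuterA (PySem.Str.lower response) entities

-- ===== PORT B =====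
def contains_uncertainty_markers_py_alt (response : String) (entities : List String) : Bool :=
  let response_lower := PySem.Str.lower response
  let has_phrase := pvPhrases.any (fun p => PySem.Str.isIn p response_lower)
  let has_entity := entities.any (fun e => PySem.Str.isIn (PySem.Str.lower e) response_lower)
  has_phrase && has_entity

-- ===== PRECONDITION & SPEC =====
def Spec_contains_uncertainty_markers_py (response : String) (entities : List String) (out : Bool) : Prop := out = contains_uncertainty_markers_py_alt response entities
instance (response : String) (entities : List String) (out : Bool) : Decidable (Spec_contains_uncertainty_markers_py response entities out) := by unfold Spec_contains_uncertainty_markers_py; infer_instance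

-- ===== CLAIM (what is proved, stated in full; the proofs are below) =====
def Claim_equal_contains_uncertainty_markers_py : Prop := ∀ (response : String) (entities : List String), Dom_contains_uncertainty_markers_py response entities → Spec_contains_uncertainty_markers_py response entities (contains_uncertainty_markers_py response entities)

-- ===== LEMMAS AND PROOFS =====

-- The inner loop over phrases is the phrase-scan conjoined with the entity check.
theorem pvInnerA_eq (rl el : String) (ps : List String) :
    pvInnerA rl el ps = (ps.any (fun p => PySem.Str.isIn p rl) && PySem.Str.isIn el rl) := by
  induction ps with
  | nil => simp [pvInnerA]
  | cons p ps ih =>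
    simp only [pvInnerA, List.any_cons, ih]
    cases hc : PySem.Str.isIn el rl <;> simp [PySem.Str.isIn] at hc ⊢ 

-- The outer loop over entities is the phrase-scan conjoined with the entity-scan.
theorem pvOuterA_eq (rl : String) (es : List String) :
    pvOuterA rl es =
      (pvPhrases.any (fun p => PySem.Str.isIn p rl) &&
       es.any (fun e => PySem.Str.isIn (PySem.Str.lower e) rl)) := by
  induction es with
  | nil => simp [pvOuterA]
  | cons e es ih =>
    simp only [pvOuterA, pvInnerA_eq, List.any_cons, ih]
    cases hp : pvPhrases.any (fun p => PySem.Str.isIn p rl) <;>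
      simp [List.any_eq_true] at hp ⊢ 

-- ===== VERDICT (by name: the statement is the Claim_ definition above) =====
theorem contains_uncertainty_markers_py_spec : Claim_equal_contains_uncertainty_markers_py := by
  intro response entities _
  unfold Spec_contains_uncertainty_markers_py contains_uncertainty_markers_py
    contains_uncertainty_markers_py_alt
  exact pvOuterA_eq _ _
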